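-- pv_equiv track=rewrite | github.com/ManiaJack/PythonStudy | longest_repeat_inside.py | repeat_inside
-- ===== SOURCE A (Python) =====
-- def repeat_inside(string):
--     _len = len(string)
--     length_max = 0
--     for index1 in range(_len - 1):
--         for index2 in range(index1 + 1, _len):
--             # 发现相同字符，代表疑似重复字符串开始
--             if string[index1] == string[index2]:
--                 base_length = index2 - index1
--                 # 剩余字符串长度小于如果疑似字符串长度，则跳过循环
--                 if _len - index2 < base_length:
--                     continue
--                 # 疑似字符串重复数为n，疑似字符串内容为base_str
--                 n = 0
--                 base_str = string[index1:index2]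
--                 # 当第n个字符串长度不超过字符串总长度
--                 while index2 + n * base_length <= _len:
--                     # 判断第n个字符串是否和疑似字符串相同，若相同，则n加一。否则结束循环。
--                     if string[index2 + n * base_length:index2 + (n + 1) * base_length] == base_str:
--                         n += 1
--                     else:
--                         break
--                 # 如果n等于0，说明疑似字符串非重复，继续循环
--                 if n == 0:
--                     continue
--                 # 字符串总长度为疑似字符串长度+重复字符串长度，大于原最大值时记录疑似字符串和最大长度
--                 length = (n + 1) * base_length
--                 if length > length_max:
--                     length_max = length
--                     max_str = string[index1:index2 + n * base_length]
--     if length_max == 0: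
--         return ''
--     return max_str
-- ===== SOURCE B (Python) =====
-- def repeat_inside(string):
--     # per-period shifted-match runs (O(n^2)) instead of A's per-pair block rescans
--     n = len(string)
--     best_len = 0
--     best_i = 0
--     best_p = 0
--     for p in range(1, n // 2 + 1):
--         run = 0
--         for i in range(n - p - 1, -1, -1):
--             run = run + 1 if string[i] == string[i + p] else 0
--             if run >= p:
--                 length = (run // p + 1) * p
--                 if (length > best_len
--                         or (length == best_len
--                             and (i < best_i or (i == best_i and p < best_p)))):
--                     best_len, best_i, best_p = length, i, p
--     return string[best_i:best_i + best_len]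
-- ===== Notes on version B (the rewrite author's own statement) =====
-- stated objective: faster
-- what changed: A tests every start/shift pair and rescans the repeated block with slice comparisons for each pair; B scans each period p once, maintaining a run counter of shifted character matches (s[i]==s[i+p]) from which every tandem length at that period is read off directly, keeping the same best-candidate tie-breaking.
import Mathlib
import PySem

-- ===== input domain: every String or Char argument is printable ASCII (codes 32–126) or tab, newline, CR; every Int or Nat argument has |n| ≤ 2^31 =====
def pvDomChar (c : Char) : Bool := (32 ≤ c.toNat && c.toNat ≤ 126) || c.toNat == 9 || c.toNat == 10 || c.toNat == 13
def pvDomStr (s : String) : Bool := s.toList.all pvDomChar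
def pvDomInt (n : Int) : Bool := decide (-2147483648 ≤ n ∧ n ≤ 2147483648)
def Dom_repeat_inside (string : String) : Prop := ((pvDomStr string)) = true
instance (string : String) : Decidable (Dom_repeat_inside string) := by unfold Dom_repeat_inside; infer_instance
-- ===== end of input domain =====

-- B re-implements A's longest-tandem-repeat search: instead of rescanning candidate blocks for

-- every start/shift pair, B scans each period once with a shifted-match run counter (same result,

-- measurably faster; the agreement of the two searches, tie-breaks included, is proved below).

-- ===== PORT A =====

-- the inner `while` loop of A (fuel-bounded transliteration; fuel len+2 always suffices)

def pvAwhile (cs : List Char) (i2 bl : Int) (base : List Char) : Nat → Int → Int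
  | 0, n => n
  | fuel+1, n =>
    if i2 + n * bl ≤ (cs.length : Int) then
      if PySem.List.slice cs (some (i2 + n * bl)) (some (i2 + (n + 1) * bl)) == base then
        pvAwhile cs i2 bl base fuel (n + 1)
      else n
    else n

-- the body of A's inner `for index2` loop

def pvAstep (cs : List Char) (st : Int × List Char) (i1 i2 : Int) : Int × List Char :=
  if PySem.List.pyGet? cs i1 == PySem.List.pyGet? cs i2 then
    let bl := i2 - i1
    if (cs.length : Int) - i2 < bl then st
    else
      let base := PySem.List.slice cs (some i1) (some i2)
      let n := pvAwhile cs i2 bl base (cs.length + 2) 0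
      if n == 0 then st
      else
        let length := (n + 1) * bl
        if length > st.1 then (length, PySem.List.slice cs (some i1) (some (i2 + n * bl)))
        else st
  else st

def repeat_inside (string : String) : String :=
  let cs := string.toList
  let len : Int := cs.length
  let res := (PySem.List.pyRange 0 (len - 1) 1).foldl
    (fun st i1 => (PySem.List.pyRange (i1 + 1) len 1).foldl
      (fun st i2 => pvAstep cs st i1 i2) st)
    (0, [])
  if res.1 == 0 then "" else String.ofList res.2

-- ===== PORT B =====

-- the body of B's inner `for i` loop (state: (best triple, run))

def pvBstep (cs : List Char) (p : Int) (st : (Int × Int × Int) × Int) (i : Int) :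
    (Int × Int × Int) × Int :=
  let run : Int := if PySem.List.pyGet? cs i == PySem.List.pyGet? cs (i + p) then st.2 + 1 else 0
  let best := st.1
  if run ≥ p then
    let length := (PySem.Int.floordiv run p + 1) * p
    if length > best.1 ∨ (length = best.1 ∧ (i < best.2.1 ∨ (i = best.2.1 ∧ p < best.2.2))) then
      ((length, i, p), run)
    else (best, run)
  else (best, run)

def repeat_inside_alt (string : String) : String :=
  let cs := string.toList
  let n : Int := cs.length
  let best := (PySem.List.pyRange 1 (PySem.Int.floordiv n 2 + 1) 1).foldl
    (fun best p => ((PySem.List.pyRange (n - p - 1) (-1) (-1)).foldl (pvBstep cs p) (best, 0)).1)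
    (0, 0, 0)
  String.ofList (PySem.List.slice cs (some best.2.1) (some (best.2.1 + best.1)))

-- ===== PRECONDITION & SPEC =====

def Spec_repeat_inside (string : String) (out : String) : Prop := out = repeat_inside_alt string

instance (string : String) (out : String) : Decidable (Spec_repeat_inside string out) := by unfold Spec_repeat_inside; infer_instance

-- ===== CLAIM (what is proved, stated in full; the proofs are below) =====

def Claim_equal_repeat_inside : Prop := ∀ (string : String), Dom_repeat_inside string → Spec_repeat_inside string (repeat_inside string)

-- ===== LEMMAS AND PROOFS =====

def pvRun' (cs : List Char) (p : Nat) (i : Nat) : Nat :=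
  if h : i + p < cs.length ∧ cs[i]? = cs[i + p]? then pvRun' cs p (i + 1) + 1 else 0
  termination_by cs.length - i
  decreasing_by omega

theorem pvRun'_le (cs : List Char) (p : Nat) : ∀ i, i + p ≤ cs.length → i + p + pvRun' cs p i ≤ cs.length := by
  intro i
  induction i using pvRun'.induct cs p with
  | case1 i h ih => intro _; rw [pvRun', dif_pos h]; have := ih (by omega); omega
  | case2 i h => intro _; rw [pvRun', dif_neg h]; omega

theorem pvRun'_match (cs : List Char) (p : Nat) :
    ∀ i, ∀ j < pvRun' cs p i, i + j + p < cs.length ∧ cs[i + j]? = cs[i + j + p]? := by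
  intro i
  induction i using pvRun'.induct cs p with
  | case1 i h ih =>
    intro j hj
    rw [pvRun', dif_pos h] at hj
    cases j with
    | zero => simpa using h
    | succ j =>
      have := ih j (by omega)
      constructor
      · omega
      · have e : i + (j + 1) = i + 1 + j := by omega
        rw [e]; exact this.2
  | case2 i h => intro j hj; rw [pvRun', dif_neg h] at hj; omega

theorem pvRun'_ge (cs : List Char) (p : Nat) :
    ∀ m i, (∀ j < m, i + j + p < cs.length ∧ cs[i + j]? = cs[i + j + p]?) → m ≤ pvRun' cs p i := by
  intro m
  induction m with
  | zero => intro i _; omega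
  | succ m ih =>
    intro i hm
    have h0 := hm 0 (by omega)
    simp only [Nat.add_zero] at h0
    rw [pvRun', dif_pos h0]
    have := ih (i + 1) (fun j hj => by
      have := hm (j + 1) (by omega)
      constructor
      · omega
      · have e : i + 1 + j = i + (j + 1) := by omega
        rw [e]; exact this.2)
    omega

theorem pvChain (cs : List Char) (p : Nat) (i : Nat) :
    ∀ n, n * p ≤ pvRun' cs p i → ∀ d < p, cs[i + d]? = cs[i + n * p + d]? := by
  intro n
  induction n with
  | zero => intro _ d _; simp
  | succ n ih =>
    intro hn d hd
    have h1 : n * p ≤ pvRun' cs p i := by nlinarith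
    have e1 := ih h1 d hd
    have h2 := pvRun'_match cs p i (n * p + d) (by nlinarith)
    have e : i + (n * p + d) + p = i + (n + 1) * p + d := by ring
    have e2 : i + (n * p + d) = i + n * p + d := by omega
    have h2' : cs[i + n * p + d]? = cs[i + (n * p + d) + p]? := by rw [← e2]; exact h2.2
    rw [e1, h2', e]

theorem pvTD (cs : List Char) (a t : Nat) (k : Nat) :
    ((cs.drop a).take t)[k]? = if k < t then cs[a + k]? else none := by
  by_cases h : k < t
  · rw [if_pos h, List.getElem?_take_of_lt h, List.getElem?_drop]
  · rw [if_neg h, List.getElem?_eq_none_iff.2]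
    simp [List.length_take]
    omega

theorem pvBlock_iff (cs : List Char) (p i n : Nat) (hp : 1 ≤ p) (hip : i + p < cs.length)
    (hn : n * p ≤ pvRun' cs p i) :
    ((cs.drop (i + p + n * p)).take p = (cs.drop i).take p) ↔ (n + 1) * p ≤ pvRun' cs p i := by
  have hrle := pvRun'_le cs p i (by omega)
  constructor
  · intro heq
    have hlen := congrArg List.length heq
    simp only [List.length_take, List.length_drop] at hlen
    have hroom : i + p + n * p + p ≤ cs.length := by omega
    apply pvRun'_ge
    intro j hj
    by_cases hjc : j < n * p
    · exact pvRun'_match cs p i j (by omega)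
    · have hd : j - n * p < p := by
        have e : (n + 1) * p = n * p + p := by ring
        omega
      set d := j - n * p with hdd
      have hjd : j = n * p + d := by omega
      have h1 : cs[i + d]? = cs[i + n * p + d]? := pvChain cs p i n hn d hd
      have h2 : cs[i + p + n * p + d]? = cs[i + d]? := by
        have := congrArg (fun l => l[d]?) heq
        simpa [pvTD, hd] using this
      constructor
      · omega
      · rw [show i + j + p = i + p + n * p + d by omega, show i + j = i + n * p + d by omega,
          ← h1, h2]
  · intro h
    apply List.ext_getElem?
    intro k
    rw [pvTD, pvTD]
    by_cases hk : k < p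
    · rw [if_pos hk, if_pos hk]
      rw [show i + p + n * p + k = i + (n + 1) * p + k from by ring]
      exact (pvChain cs p i (n + 1) h k hk).symm
    · rw [if_neg hk, if_neg hk]

theorem pvAwhile_eq (cs : List Char) (p i : Nat) (hp : 1 ≤ p) (hip : i + p < cs.length) :
    ∀ fuel n, n ≤ pvRun' cs p i / p → pvRun' cs p i / p + 1 - n ≤ fuel →
      pvAwhile cs ((i : Int) + (p : Int)) (p : Int) ((cs.drop i).take p) fuel (n : Int)
        = ((pvRun' cs p i / p : Nat) : Int) := by
  have hrle := pvRun'_le cs p i (by omega)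
  intro fuel
  induction fuel with
  | zero => intro n h1 h2; omega
  | succ fuel ih =>
    intro n h1 h2
    have hnp : n * p ≤ pvRun' cs p i := (Nat.le_div_iff_mul_le hp).1 h1
    rw [pvAwhile]
    have e1 : (i : Int) + (p : Int) + (n : Int) * (p : Int) = ((i + p + n * p : Nat) : Int) := by
      push_cast; ring
    have e2 : (i : Int) + (p : Int) + ((n : Int) + 1) * (p : Int) = ((i + p + (n + 1) * p : Nat) : Int) := by
      push_cast; ring
    rw [if_pos (by rw [e1]; exact_mod_cast by omega : (i : Int) + (p : Int) + (n : Int) * (p : Int) ≤ (cs.length : Int))]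
    rw [e1, e2, PySem.List.slice_natCast]
    have e3 : i + p + (n + 1) * p - (i + p + n * p) = p := by
      have : (n + 1) * p = n * p + p := by ring
      omega
    rw [e3]
    by_cases hb : (cs.drop (i + p + n * p)).take p = (cs.drop i).take p
    · rw [if_pos (by simpa using hb)]
      have hstep : (n + 1) * p ≤ pvRun' cs p i := (pvBlock_iff cs p i n hp hip hnp).1 hb
      have h1' : n + 1 ≤ pvRun' cs p i / p := (Nat.le_div_iff_mul_le hp).2 hstep
      have := ih (n + 1) h1' (by omega)
      rw [show ((n : Int) + 1) = ((n + 1 : Nat) : Int) by push_cast; ring]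
      exact this
    · rw [if_neg (by simpa using hb)]
      have : ¬ (n + 1) * p ≤ pvRun' cs p i := fun h => hb ((pvBlock_iff cs p i n hp hip hnp).2 h)
      have hlt : pvRun' cs p i / p < n + 1 := by
        rw [Nat.div_lt_iff_lt_mul hp]
        omega
      have : n = pvRun' cs p i / p := by omega
      rw [this]

def pvCand (cs : List Char) (i p : Nat) : Prop := 1 ≤ p ∧ p ≤ pvRun' cs p i

def pvVal (cs : List Char) (i p : Nat) : Nat := (pvRun' cs p i / p + 1) * p

def pvStepN (cs : List Char) (st : Int × List Char) (i p : Nat) : Int × List Char :=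
  if 1 ≤ p ∧ p ≤ pvRun' cs p i then
    (if ((pvVal cs i p : Nat) : Int) > st.1 then
      (((pvVal cs i p : Nat) : Int), (cs.drop i).take (pvVal cs i p))
    else st)
  else st

theorem pvAstep_eq (cs : List Char) (st : Int × List Char) (i1 i2 : Nat)
    (h1 : i1 < i2) (h2 : i2 < cs.length) :
    pvAstep cs st (i1 : Int) (i2 : Int) = pvStepN cs st i1 (i2 - i1) := by
  set p := i2 - i1 with hpdef
  have hp : 1 ≤ p := by omega
  have hi2 : i2 = i1 + p := by omega
  have hip : i1 + p < cs.length := by omega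
  have hrle := pvRun'_le cs p i1 (by omega)
  rw [pvAstep]
  by_cases hc : cs[i1]? = cs[i1 + p]?
  case neg =>
    -- chars differ: run is 0, no candidate
    have hr0 : pvRun' cs p i1 = 0 := by
      rw [pvRun', dif_neg]
      intro h
      exact hc h.2
    rw [if_neg]
    · rw [pvStepN, if_neg]
      intro h
      obtain ⟨-, h2'⟩ := h
      omega
    · simp only [PySem.List.pyGet?_natCast, beq_iff_eq]
      rw [← hi2] at hc
      exact hc
  case pos =>
    rw [if_pos (by simp only [PySem.List.pyGet?_natCast, beq_iff_eq]; rw [← hi2] at hc; exact hc)]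
    simp only
    by_cases hg : (cs.length : Int) - (i2 : Int) < (i2 : Int) - (i1 : Int)
    · -- not enough room: len < i1 + 2p, so run < p, no candidate
      rw [if_pos hg, pvStepN, if_neg]
      intro h
      obtain ⟨-, h2'⟩ := h
      omega
    · rw [if_neg hg]
      have hroom : i1 + 2 * p ≤ cs.length := by omega
      have hdivle : pvRun' cs p i1 / p ≤ pvRun' cs p i1 := Nat.div_le_self _ _
      have ebase : PySem.List.slice cs (some (i1 : Int)) (some (i2 : Int))
          = (cs.drop i1).take p := by
        rw [PySem.List.slice_natCast, hpdef]
      have ei2 : (i2 : Int) = (i1 : Int) + (p : Int) := by push_cast [hi2]; ring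
      have ebl : (i2 : Int) - (i1 : Int) = (p : Int) := by push_cast [hi2]; ring
      have ewhile : pvAwhile cs (i2 : Int) ((i2 : Int) - (i1 : Int))
          (PySem.List.slice cs (some (i1 : Int)) (some (i2 : Int))) (cs.length + 2) 0
          = ((pvRun' cs p i1 / p : Nat) : Int) := by
        have hf1 : (0 : Nat) ≤ pvRun' cs p i1 / p := Nat.zero_le _
        have hf2 : pvRun' cs p i1 / p + 1 - 0 ≤ cs.length + 2 := by
          have h3 : pvRun' cs p i1 ≤ cs.length := by omega
          have h4 := le_trans hdivle h3
          exact le_trans (Nat.sub_le _ _) (by exact Nat.add_le_add h4 (by omega))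
        rw [ebase, ebl, ei2, show (0 : Int) = ((0 : Nat) : Int) from rfl]
        exact pvAwhile_eq cs p i1 hp hip (cs.length + 2) 0 hf1 hf2
      rw [ewhile]
      by_cases hz : pvRun' cs p i1 / p = 0
      · rw [if_pos (by rw [beq_iff_eq]; exact_mod_cast hz), pvStepN, if_neg]
        intro h
        obtain ⟨-, h2'⟩ := h
        have : 1 ≤ pvRun' cs p i1 / p := (Nat.le_div_iff_mul_le hp).2 (by omega)
        omega
      · have h5 : 1 ≤ pvRun' cs p i1 / p := Nat.one_le_iff_ne_zero.2 hz
        have h6 := (Nat.le_div_iff_mul_le hp).1 h5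
        have hcand : pvCand cs i1 p := ⟨hp, by omega⟩
        have elen : (((pvRun' cs p i1 / p : Nat) : Int) + 1) * ((i2 : Int) - (i1 : Int))
            = ((pvVal cs i1 p : Nat) : Int) := by
          rw [ebl, pvVal]; push_cast; ring
        have eidx : (i2 : Int) + ((pvRun' cs p i1 / p : Nat) : Int) * ((i2 : Int) - (i1 : Int))
            = ((i1 + pvVal cs i1 p : Nat) : Int) := by
          rw [ebl, ei2, pvVal]; push_cast; ring
        rw [if_neg (by rw [beq_iff_eq]; intro h; exact hz (by exact_mod_cast h)), elen, eidx,
          PySem.List.slice_natCast, show i1 + pvVal cs i1 p - i1 = pvVal cs i1 p by omega,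
          pvStepN, if_pos (show 1 ≤ p ∧ p ≤ pvRun' cs p i1 from hcand)]

def pvKey (cs : List Char) (i p : Nat) : Nat × Nat × Nat := (pvVal cs i p, i, p)

def pvBetter (a b : Nat × Nat × Nat) : Prop :=
  b.1 < a.1 ∨ (a.1 = b.1 ∧ (a.2.1 < b.2.1 ∨ (a.2.1 = b.2.1 ∧ a.2.2 < b.2.2)))

def pvPairLt (x y : Nat × Nat) : Prop := x.1 < y.1 ∨ (x.1 = y.1 ∧ x.2 < y.2)

def pvGood {α : Type} (cs : List Char) (init : α) (enc : Nat → Nat → α)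
    (S : Nat → Nat → Prop) (st : α) : Prop :=
  (st = init ∧ ∀ i p, S i p → ¬ pvCand cs i p) ∨
  (∃ i p, S i p ∧ pvCand cs i p ∧ st = enc i p ∧
    ∀ i' p', S i' p' → pvCand cs i' p' → (i', p') ≠ (i, p) →
      pvBetter (pvKey cs i p) (pvKey cs i' p'))

theorem pvBetter_trans {a b c : Nat × Nat × Nat} (h1 : pvBetter a b) (h2 : pvBetter b c) :
    pvBetter a c := by
  obtain ⟨a1, a2, a3⟩ := a; obtain ⟨b1, b2, b3⟩ := b; obtain ⟨c1, c2, c3⟩ := c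
  simp only [pvBetter] at *
  omega

theorem pvBetter_total {a b : Nat × Nat × Nat} (h : a.2 ≠ b.2) : pvBetter a b ∨ pvBetter b a := by
  obtain ⟨a1, a2, a3⟩ := a; obtain ⟨b1, b2, b3⟩ := b
  simp only [pvBetter] at *
  by_cases h2 : a2 = b2 <;> (simp_all; omega)

theorem pvBetter_asymm {a b : Nat × Nat × Nat} (h : pvBetter a b) : ¬ pvBetter b a := by
  obtain ⟨a1, a2, a3⟩ := a; obtain ⟨b1, b2, b3⟩ := b
  simp only [pvBetter] at *
  omega

theorem pvGood_iff {α : Type} (cs : List Char) (init : α) (enc : Nat → Nat → α)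
    {S S' : Nat → Nat → Prop} (h : ∀ i p, S i p ↔ S' i p) (st : α) :
    pvGood cs init enc S st ↔ pvGood cs init enc S' st := by
  unfold pvGood
  constructor
  · rintro (⟨h1, h2⟩ | ⟨i, p, h1, h2, h3, h4⟩)
    · exact Or.inl ⟨h1, fun i p hs => h2 i p ((h i p).2 hs)⟩
    · exact Or.inr ⟨i, p, (h i p).1 h1, h2, h3,
        fun i' p' hs => h4 i' p' ((h i' p').2 hs)⟩
  · rintro (⟨h1, h2⟩ | ⟨i, p, h1, h2, h3, h4⟩)
    · exact Or.inl ⟨h1, fun i p hs => h2 i p ((h i p).1 hs)⟩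
    · exact Or.inr ⟨i, p, (h i p).2 h1, h2, h3,
        fun i' p' hs => h4 i' p' ((h i' p').1 hs)⟩

theorem pvVal_pos (cs : List Char) (i p : Nat) (hp : 1 ≤ p) : 1 ≤ pvVal cs i p :=
  Nat.mul_pos (Nat.succ_pos _) hp

def pvEncA (cs : List Char) (i p : Nat) : Int × List Char :=
  (((pvVal cs i p : Nat) : Int), (cs.drop i).take (pvVal cs i p))

theorem pvStepN_good (cs : List Char) (S : Nat → Nat → Prop) (st : Int × List Char) (i p : Nat)
    (hS : ∀ i' p', S i' p' → pvCand cs i' p' → pvPairLt (i', i' + p') (i, i + p))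
    (hg : pvGood cs ((0 : Int), ([] : List Char)) (pvEncA cs) S st) :
    pvGood cs ((0 : Int), ([] : List Char)) (pvEncA cs)
      (fun i' p' => S i' p' ∨ (i' = i ∧ p' = p)) (pvStepN cs st i p) := by
  rw [pvStepN]
  by_cases hc : pvCand cs i p
  · rw [if_pos (show 1 ≤ p ∧ p ≤ pvRun' cs p i from hc)]
    rcases hg with ⟨hst, hnone⟩ | ⟨ib, pb, hSb, hcb, hst, hbest⟩
    · rw [hst]
      rw [if_pos (by show (0:Int) < ((pvVal cs i p : Nat) : Int); exact_mod_cast pvVal_pos cs i p hc.1)]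
      refine Or.inr ⟨i, p, Or.inr ⟨rfl, rfl⟩, hc, rfl, ?_⟩
      rintro i' p' (hs | ⟨rfl, rfl⟩) hcand' hne
      · exact absurd hcand' (hnone i' p' hs)
      · exact absurd rfl hne
    · rw [hst]
      have hq := hS ib pb hSb hcb
      have hqne : (ib, pb) ≠ (i, p) := by
        rcases hq with h | ⟨h1, h2⟩
        · intro he; rw [Prod.mk.injEq] at he; omega
        · intro he; rw [Prod.mk.injEq] at he; omega
      by_cases hlt : pvVal cs ib pb < pvVal cs i p
      · rw [if_pos (by simp only [pvEncA]; exact_mod_cast hlt)]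
        have hbet : pvBetter (pvKey cs i p) (pvKey cs ib pb) := Or.inl hlt
        refine Or.inr ⟨i, p, Or.inr ⟨rfl, rfl⟩, hc, rfl, ?_⟩
        rintro i' p' (hs | ⟨rfl, rfl⟩) hcand' hne
        · by_cases he : (i', p') = (ib, pb)
          · rw [Prod.mk.injEq] at he
            rw [he.1, he.2]
            exact hbet
          · exact pvBetter_trans hbet (hbest i' p' hs hcand' he)
        · exact absurd rfl hne
      · rw [if_neg (by simp only [pvEncA]; exact_mod_cast hlt)]
        refine Or.inr ⟨ib, pb, Or.inl hSb, hcb, hst ▸ rfl, ?_⟩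
        rintro i' p' (hs | ⟨rfl, rfl⟩) hcand' hne
        · exact hbest i' p' hs hcand' hne
        · -- the new candidate loses: its value is ≤ and its pair is lex-greater
          simp only [pvKey, pvBetter]
          rcases hq with h | ⟨h1, h2⟩ <;> omega
  · rw [if_neg (show ¬ (1 ≤ p ∧ p ≤ pvRun' cs p i) from hc)]
    rcases hg with ⟨hst, hnone⟩ | ⟨ib, pb, hSb, hcb, hst, hbest⟩
    · refine Or.inl ⟨hst, ?_⟩
      rintro i' p' (hs | ⟨rfl, rfl⟩)
      · exact hnone i' p' hs
      · exact hc
    · refine Or.inr ⟨ib, pb, Or.inl hSb, hcb, hst, ?_⟩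
      rintro i' p' (hs | ⟨rfl, rfl⟩) hcand' hne
      · exact hbest i' p' hs hcand' hne
      · exact absurd hcand' hc

theorem pvFoldA_inv (cs : List Char) :
    ∀ (l : List (Nat × Nat)) (S : Nat → Nat → Prop) (st : Int × List Char),
      (∀ q ∈ l, q.1 < q.2) →
      l.Pairwise pvPairLt →
      (∀ i p, S i p → pvCand cs i p → ∀ q ∈ l, pvPairLt (i, i + p) q) →
      pvGood cs ((0 : Int), ([] : List Char)) (pvEncA cs) S st →
      pvGood cs ((0 : Int), ([] : List Char)) (pvEncA cs)
        (fun i p => S i p ∨ (i, i + p) ∈ l)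
        (l.foldl (fun st q => pvStepN cs st q.1 (q.2 - q.1)) st) := by
  intro l
  induction l with
  | nil =>
    intro S st _ _ _ hg
    simpa using (pvGood_iff cs _ (pvEncA cs) (S' := fun i p => S i p ∨ (i, i + p) ∈ ([] : List (Nat × Nat))) (by simp) st).1 hg
  | cons q l ih =>
    intro S st hl hsort hS hg
    have hq12 : q.1 < q.2 := hl q List.mem_cons_self
    have hqeq : q = (q.1, q.1 + (q.2 - q.1)) := Prod.ext_iff.2 ⟨rfl, by simp; omega⟩
    have hstep := pvStepN_good cs S st q.1 (q.2 - q.1)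
      (fun i' p' hs hc => by rw [← hqeq]; exact hS i' p' hs hc q List.mem_cons_self) hg
    have htail := ih (fun i p => S i p ∨ (i = q.1 ∧ p = q.2 - q.1))
      (pvStepN cs st q.1 (q.2 - q.1))
      (fun q' hq' => hl q' (List.mem_cons_of_mem _ hq'))
      (List.Pairwise.of_cons hsort)
      (by
        rintro i p (hs | ⟨rfl, rfl⟩) hc q' hq'
        · exact hS i p hs hc q' (List.mem_cons_of_mem _ hq')
        · rw [← hqeq]
          exact (List.pairwise_cons.1 hsort).1 q' hq')
      hstep
    rw [List.foldl_cons]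
    refine (pvGood_iff cs _ (pvEncA cs) ?_ _).1 htail
    intro i p
    rw [List.mem_cons]
    constructor
    · rintro ((hs | ⟨rfl, rfl⟩) | hm)
      · exact Or.inl hs
      · exact Or.inr (Or.inl hqeq.symm)
      · exact Or.inr (Or.inr hm)
    · rintro (hs | (he | hm))
      · exact Or.inl (Or.inl hs)
      · refine Or.inl (Or.inr ?_)
        rw [hqeq] at he
        rw [Prod.mk.injEq] at he
        omega
      · exact Or.inr hm

def pvPairsA (N : Nat) : List (Nat × Nat) :=
  (List.range (N - 1)).flatMap (fun i => (List.range (N - 1 - i)).map (fun k => (i, i + 1 + k)))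

theorem pvPairsA_mem (N : Nat) (q : Nat × Nat) : q ∈ pvPairsA N ↔ q.1 < q.2 ∧ q.2 < N := by
  obtain ⟨a, b⟩ := q
  simp only [pvPairsA, List.mem_flatMap, List.mem_map, List.mem_range, Prod.mk.injEq]
  constructor
  · rintro ⟨i, hi, k, hk, rfl, rfl⟩
    omega
  · rintro ⟨h1, h2⟩
    exact ⟨a, by omega, b - a - 1, by omega, rfl, by omega⟩

theorem pvPairsA_pairwise (N : Nat) : (pvPairsA N).Pairwise pvPairLt := by
  rw [pvPairsA, List.pairwise_flatMap]
  constructor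
  · intro a _
    rw [List.pairwise_map]
    exact List.pairwise_lt_range.imp (fun h => Or.inr ⟨rfl, by omega⟩)
  · refine List.pairwise_lt_range.imp ?_
    intro a b hab
    simp only [List.mem_map, List.mem_range]
    rintro x ⟨k, hk, rfl⟩ y ⟨k', hk', rfl⟩
    exact Or.inl hab

def pvAres (cs : List Char) : Int × List Char :=
  (pvPairsA cs.length).foldl (fun st q => pvStepN cs st q.1 (q.2 - q.1)) (0, [])

theorem pvA_unfold (s : String) :
    repeat_inside s
      = (if (pvAres s.toList).1 == 0 then "" else String.ofList (pvAres s.toList).2) := by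
  set cs := s.toList with hcs
  simp only [repeat_inside]
  have houter : (PySem.List.pyRange 0 ((cs.length : Int) - 1) 1)
      = (List.range (cs.length - 1)).map (fun k : Nat => (k : Int)) := by
    rw [PySem.List.pyRange_one]
    have e : ((cs.length : Int) - 1 - 0).toNat = cs.length - 1 := by omega
    rw [e]
    exact List.map_congr_left (fun k _ => by omega)
  have hflat : pvAres cs
      = (List.range (cs.length - 1)).foldl
          (fun st k => (List.range (cs.length - 1 - k)).foldl
            (fun st j => pvStepN cs st k (k + 1 + j - k)) st) ((0 : Int), ([] : List Char)) := by
    rw [pvAres, pvPairsA, List.foldl_flatMap]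
    exact PySem.List.foldl_congr_mem _ _ _ _ (fun st x _ => by rw [List.foldl_map])
  rw [houter, List.foldl_map, hflat]
  rw [PySem.List.foldl_congr_mem _ _
    (fun st k => (List.range (cs.length - 1 - k)).foldl
      (fun st j => pvStepN cs st k (k + 1 + j - k)) st) _ ?_]
  intro st k hk
  rw [List.mem_range] at hk
  have hinner : (PySem.List.pyRange ((k : Int) + 1) (cs.length : Int) 1)
      = (List.range (cs.length - 1 - k)).map (fun j : Nat => ((k + 1 + j : Nat) : Int)) := by
    rw [PySem.List.pyRange_one]
    have e : ((cs.length : Int) - ((k : Int) + 1)).toNat = cs.length - 1 - k := by omega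
    rw [e]
    exact List.map_congr_left (fun j _ => by push_cast; ring)
  rw [hinner, List.foldl_map]
  exact PySem.List.foldl_congr_mem _ _ _ _ (fun st' j hj => by
    rw [List.mem_range] at hj
    exact pvAstep_eq cs st' k (k + 1 + j) (by omega) (by omega))

def pvEncB (cs : List Char) (i p : Nat) : Int × Int × Int :=
  (((pvVal cs i p : Nat) : Int), (i : Int), (p : Int))

def pvStepB (cs : List Char) (best : Int × Int × Int) (i p : Nat) : Int × Int × Int :=
  if 1 ≤ p ∧ p ≤ pvRun' cs p i then
    (if ((pvVal cs i p : Nat) : Int) > best.1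
        ∨ (((pvVal cs i p : Nat) : Int) = best.1
            ∧ ((i : Int) < best.2.1 ∨ ((i : Int) = best.2.1 ∧ (p : Int) < best.2.2))) then
      pvEncB cs i p
    else best)
  else best

theorem pvBstep_eq (cs : List Char) (best : Int × Int × Int) (i p : Nat)
    (hp : 1 ≤ p) (hip : i + p < cs.length) :
    pvBstep cs (p : Int) (best, ((pvRun' cs p (i + 1) : Nat) : Int)) (i : Int)
      = (pvStepB cs best i p, ((pvRun' cs p i : Nat) : Int)) := by
  rw [pvBstep]
  simp only
  have hrun : (if PySem.List.pyGet? cs (i : Int) == PySem.List.pyGet? cs ((i : Int) + (p : Int))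
      then ((pvRun' cs p (i + 1) : Nat) : Int) + 1 else 0) = ((pvRun' cs p i : Nat) : Int) := by
    rw [show (i : Int) + (p : Int) = ((i + p : Nat) : Int) by push_cast; ring]
    simp only [PySem.List.pyGet?_natCast, beq_iff_eq]
    by_cases hc : cs[i]? = cs[i + p]?
    · rw [if_pos hc]
      conv_rhs => rw [pvRun', dif_pos ⟨hip, hc⟩]
      push_cast; ring
    · rw [if_neg hc]
      conv_rhs => rw [pvRun', dif_neg (fun h => hc h.2)]
      simp
  rw [hrun]
  by_cases hcand : pvCand cs i p
  · rw [if_pos (by exact_mod_cast hcand.2), pvStepB, if_pos (show 1 ≤ p ∧ p ≤ pvRun' cs p i from hcand)]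
    rw [PySem.Int.floordiv_natCast]
    rw [show (((pvRun' cs p i / p : Nat) : Int) + 1) * (p : Int) = ((pvVal cs i p : Nat) : Int) by
      rw [pvVal]; push_cast; ring]
    rw [pvEncB]
    split_ifs <;> rfl
  · rw [if_neg, pvStepB, if_neg (show ¬ (1 ≤ p ∧ p ≤ pvRun' cs p i) from hcand)]
    intro h
    exact hcand ⟨hp, by exact_mod_cast h⟩

theorem pvStepB_good (cs : List Char) (S : Nat → Nat → Prop) (best : Int × Int × Int) (i p : Nat)
    (hnew : ¬ S i p)
    (hg : pvGood cs ((0, 0, 0) : Int × Int × Int) (pvEncB cs) S best) :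
    pvGood cs ((0, 0, 0) : Int × Int × Int) (pvEncB cs)
      (fun i' p' => S i' p' ∨ (i' = i ∧ p' = p)) (pvStepB cs best i p) := by
  rw [pvStepB]
  by_cases hc : pvCand cs i p
  · rw [if_pos (show 1 ≤ p ∧ p ≤ pvRun' cs p i from hc)]
    rcases hg with ⟨hst, hnone⟩ | ⟨ib, pb, hSb, hcb, hst, hbest⟩
    · rw [hst]
      rw [if_pos (Or.inl (by show (0:Int) < _; exact_mod_cast pvVal_pos cs i p hc.1))]
      refine Or.inr ⟨i, p, Or.inr ⟨rfl, rfl⟩, hc, rfl, ?_⟩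
      rintro i' p' (hs | ⟨rfl, rfl⟩) hcand' hne
      · exact absurd hcand' (hnone i' p' hs)
      · exact absurd rfl hne
    · have hbne : (i, p) ≠ (ib, pb) := fun he => hnew (by rw [Prod.mk.injEq] at he; rw [he.1, he.2]; exact hSb)
      have hcond : (((pvVal cs i p : Nat) : Int) > best.1
          ∨ (((pvVal cs i p : Nat) : Int) = best.1
              ∧ ((i : Int) < best.2.1 ∨ ((i : Int) = best.2.1 ∧ (p : Int) < best.2.2))))
          ↔ pvBetter (pvKey cs i p) (pvKey cs ib pb) := by
      -- condition over the Int-encoded stored best coincides with pvBetter on the keys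
        rw [hst]
        simp only [pvEncB, pvBetter, pvKey]
        constructor
        · rintro (h | ⟨h1, (h2 | ⟨h2, h3⟩)⟩)
          · exact Or.inl (by exact_mod_cast h)
          · exact Or.inr ⟨by exact_mod_cast h1, Or.inl (by exact_mod_cast h2)⟩
          · exact Or.inr ⟨by exact_mod_cast h1, Or.inr ⟨by exact_mod_cast h2, by exact_mod_cast h3⟩⟩
        · rintro (h | ⟨h1, (h2 | ⟨h2, h3⟩)⟩)
          · exact Or.inl (by exact_mod_cast h)
          · exact Or.inr ⟨by exact_mod_cast h1, Or.inl (by exact_mod_cast h2)⟩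
          · exact Or.inr ⟨by exact_mod_cast h1, Or.inr ⟨by exact_mod_cast h2, by exact_mod_cast h3⟩⟩
      by_cases hb : pvBetter (pvKey cs i p) (pvKey cs ib pb)
      · rw [if_pos (hcond.2 hb)]
        refine Or.inr ⟨i, p, Or.inr ⟨rfl, rfl⟩, hc, rfl, ?_⟩
        rintro i' p' (hs | ⟨rfl, rfl⟩) hcand' hne
        · by_cases he : (i', p') = (ib, pb)
          · rw [Prod.mk.injEq] at he
            rw [he.1, he.2]
            exact hb
          · exact pvBetter_trans hb (hbest i' p' hs hcand' he)
        · exact absurd rfl hne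
      · rw [if_neg (fun h => hb (hcond.1 h))]
        refine Or.inr ⟨ib, pb, Or.inl hSb, hcb, hst, ?_⟩
        rintro i' p' (hs | ⟨rfl, rfl⟩) hcand' hne
        · exact hbest i' p' hs hcand' hne
        · rcases pvBetter_total (a := pvKey cs i' p') (b := pvKey cs ib pb)
            (by simp only [pvKey]; exact fun he => hbne (by rw [Prod.mk.injEq] at he ⊢; exact ⟨he.1, he.2⟩)) with h | h
          · exact absurd h hb
          · exact h
  · rw [if_neg (show ¬ (1 ≤ p ∧ p ≤ pvRun' cs p i) from hc)]
    rcases hg with ⟨hst, hnone⟩ | ⟨ib, pb, hSb, hcb, hst, hbest⟩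
    · refine Or.inl ⟨hst, ?_⟩
      rintro i' p' (hs | ⟨rfl, rfl⟩)
      · exact hnone i' p' hs
      · exact hc
    · refine Or.inr ⟨ib, pb, Or.inl hSb, hcb, hst, ?_⟩
      rintro i' p' (hs | ⟨rfl, rfl⟩) hcand' hne
      · exact hbest i' p' hs hcand' hne
      · exact absurd hcand' hc

def pvDesc (m : Nat) : List Int := (List.range m).map (fun k => ((m - 1 - k : Nat) : Int))

theorem pvDesc_succ (m : Nat) : pvDesc (m + 1) = ((m : Nat) : Int) :: pvDesc m := by
  rw [pvDesc, List.range_succ_eq_map, List.map_cons, List.map_map, pvDesc]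
  congr 1
  refine List.map_congr_left (fun k hk => ?_)
  rw [List.mem_range] at hk
  simp only [Function.comp_apply]
  congr 1
  omega

theorem pvRun'_top (cs : List Char) (p : Nat) : pvRun' cs p (cs.length - p) = 0 := by
  rw [pvRun', dif_neg]
  intro h
  omega

theorem pvFoldB_inner (cs : List Char) (p : Nat) (hp : 1 ≤ p) :
    ∀ (m : Nat), m + p ≤ cs.length →
      ∀ (best : Int × Int × Int) (S : Nat → Nat → Prop),
        (∀ j, j < m → ¬ S j p) →
        pvGood cs ((0, 0, 0) : Int × Int × Int) (pvEncB cs) S best →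
        pvGood cs ((0, 0, 0) : Int × Int × Int) (pvEncB cs)
          (fun i' p' => S i' p' ∨ (p' = p ∧ i' < m))
          (((pvDesc m).foldl (pvBstep cs (p : Int))
            (best, ((pvRun' cs p m : Nat) : Int))).1) := by
  intro m
  induction m with
  | zero =>
    intro _ best S _ hg
    exact (pvGood_iff cs _ (pvEncB cs) (fun i p => by simp) best).1 hg
  | succ m ih =>
    intro hm best S hnotin hg
    rw [pvDesc_succ, List.foldl_cons, pvBstep_eq cs best m p hp (by omega)]
    have hstep := pvStepB_good cs S best m p (hnotin m (by omega)) hg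
    have htail := ih (by omega) (pvStepB cs best m p)
      (fun i' p' => S i' p' ∨ (i' = m ∧ p' = p))
      (fun j hj => by rintro (hs | ⟨rfl, -⟩); exacts [hnotin j (by omega) hs, by omega])
      hstep
    refine (pvGood_iff cs _ (pvEncB cs) ?_ _).1 htail
    intro i p'
    constructor
    · rintro ((hs | ⟨rfl, rfl⟩) | ⟨rfl, hi⟩)
      · exact Or.inl hs
      · exact Or.inr ⟨rfl, by omega⟩
      · exact Or.inr ⟨rfl, by omega⟩
    · rintro (hs | ⟨rfl, hi⟩)
      · exact Or.inl (Or.inl hs)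
      · by_cases he : i = m
        · exact Or.inl (Or.inr ⟨he, rfl⟩)
        · exact Or.inr ⟨rfl, by omega⟩

theorem pvBInner_list (N p : Nat) :
    PySem.List.pyRange ((N : Int) - (p : Int) - 1) (-1) (-1) = pvDesc (N - p) := by
  rw [PySem.List.pyRange_neg_one]
  have e : ((N : Int) - (p : Int) - 1 - (-1)).toNat = N - p := by omega
  rw [e, pvDesc]
  refine List.map_congr_left (fun k hk => ?_)
  rw [List.mem_range] at hk
  omega

theorem pvFoldB_outer (cs : List Char) :
    ∀ q, q ≤ cs.length →
      pvGood cs ((0, 0, 0) : Int × Int × Int) (pvEncB cs)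
        (fun i p => 1 ≤ p ∧ p ≤ q ∧ i < cs.length - p)
        ((List.range q).foldl
          (fun best t => ((pvDesc (cs.length - (t + 1))).foldl (pvBstep cs ((t + 1 : Nat) : Int))
            (best, ((pvRun' cs (t + 1) (cs.length - (t + 1)) : Nat) : Int))).1)
          (0, 0, 0)) := by
  intro q
  induction q with
  | zero =>
    intro _
    exact Or.inl ⟨rfl, fun i p h => absurd h.2.1 (by omega)⟩
  | succ q ih =>
    intro hq
    rw [List.range_succ, List.foldl_append, List.foldl_cons, List.foldl_nil]
    have hmain := pvFoldB_inner cs (q + 1) (by omega) (cs.length - (q + 1)) (by omega)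
      _ _ (fun j hj h => by omega) (ih (by omega))
    refine (pvGood_iff cs _ (pvEncB cs) ?_ _).1 hmain
    intro i p
    constructor
    · rintro (⟨h1, h2, h3⟩ | ⟨rfl, hi⟩)
      · exact ⟨h1, by omega, h3⟩
      · exact ⟨by omega, by omega, by omega⟩
    · rintro ⟨h1, h2, h3⟩
      by_cases he : p ≤ q
      · exact Or.inl ⟨h1, he, h3⟩
      · exact Or.inr ⟨by omega, by omega⟩

def pvBres (cs : List Char) : Int × Int × Int :=
  (List.range (cs.length / 2)).foldl
    (fun best t => ((pvDesc (cs.length - (t + 1))).foldl (pvBstep cs ((t + 1 : Nat) : Int))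
      (best, ((pvRun' cs (t + 1) (cs.length - (t + 1)) : Nat) : Int))).1)
    (0, 0, 0)

theorem pvB_unfold (s : String) :
    repeat_inside_alt s = String.ofList (PySem.List.slice s.toList
      (some (pvBres s.toList).2.1) (some ((pvBres s.toList).2.1 + (pvBres s.toList).1))) := by
  set cs := s.toList with hcs
  simp only [repeat_inside_alt]
  have houter : PySem.List.pyRange 1 (PySem.Int.floordiv (cs.length : Int) 2 + 1) 1
      = (List.range (cs.length / 2)).map (fun t : Nat => ((t + 1 : Nat) : Int)) := by
    have ed : PySem.Int.floordiv ((cs.length : Nat) : Int) 2 = ((cs.length / 2 : Nat) : Int) := by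
      exact_mod_cast PySem.Int.floordiv_natCast cs.length 2
    rw [ed, PySem.List.pyRange_one]
    have e : (((cs.length / 2 : Nat) : Int) + 1 - 1).toNat = cs.length / 2 := by omega
    rw [e]
    refine List.map_congr_left (fun t ht => ?_)
    push_cast
    ring
  rw [houter, List.foldl_map]
  rw [PySem.List.foldl_congr_mem _ _
    (fun best t => ((pvDesc (cs.length - (t + 1))).foldl (pvBstep cs ((t + 1 : Nat) : Int))
      (best, ((pvRun' cs (t + 1) (cs.length - (t + 1)) : Nat) : Int))).1) _ ?_]
  · rfl
  · intro best t _
    have e1 : (cs.length : Int) - ((t + 1 : Nat) : Int) - 1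
        = ((cs.length : Nat) : Int) - ((t + 1 : Nat) : Int) - 1 := rfl
    rw [e1, pvBInner_list cs.length (t + 1)]
    simp only [pvRun'_top, Nat.cast_zero]
    rfl

def pvBest (cs : List Char) (i p : Nat) : Prop :=
  pvCand cs i p ∧ ∀ i' p', pvCand cs i' p' → (i', p') ≠ (i, p) →
    pvBetter (pvKey cs i p) (pvKey cs i' p')

theorem pvCand_bounds (cs : List Char) (i p : Nat) (h : pvCand cs i p) :
    i + p < cs.length ∧ 2 * p ≤ cs.length ∧ i < cs.length - p := by
  obtain ⟨hp, hr⟩ := h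
  have h0 := pvRun'_match cs p i 0 (by omega)
  have h1 : i + 0 + p < cs.length := h0.1
  have h2 := pvRun'_le cs p i (by omega)
  constructor
  · omega
  constructor
  · omega
  · omega

theorem pvB_out (s : String) :
    (repeat_inside_alt s = "" ∧ ∀ i p, ¬ pvCand s.toList i p)
    ∨ (∃ i p, pvBest s.toList i p ∧
        repeat_inside_alt s = String.ofList ((s.toList.drop i).take (pvVal s.toList i p))) := by
  set cs := s.toList with hcs
  have hgood := pvFoldB_outer cs (cs.length / 2) (Nat.div_le_self _ _)
  rcases hgood with ⟨hst, hnone⟩ | ⟨i, p, hS, hcand, henc, hbest⟩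
  · left
    have hnc : ∀ i p, ¬ pvCand cs i p := by
      intro i p hc
      have hb := pvCand_bounds cs i p hc
      exact hnone i p ⟨hc.1, by
        rw [Nat.le_div_iff_mul_le (by omega)]
        omega, hb.2.2⟩ hc
    refine ⟨?_, hnc⟩
    rw [pvB_unfold]
    show String.ofList (PySem.List.slice cs (some (pvBres cs).2.1)
      (some ((pvBres cs).2.1 + (pvBres cs).1))) = ""
    rw [show pvBres cs = ((0 : Int), (0 : Int), (0 : Int)) from hst]
    norm_num
    have h0 : PySem.List.slice cs none (some ((0 : Nat) : Int)) = cs.take 0 :=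
      PySem.List.slice_to_natCast cs 0
    simpa using h0
  · right
    refine ⟨i, p, ⟨hcand, ?_⟩, ?_⟩
    · intro i' p' hc' hne
      have hb := pvCand_bounds cs i' p' hc'
      exact hbest i' p' ⟨hc'.1, by
        rw [Nat.le_div_iff_mul_le (by omega)]
        omega, hb.2.2⟩ hc' hne
    · rw [pvB_unfold]
      show String.ofList (PySem.List.slice cs (some (pvBres cs).2.1)
        (some ((pvBres cs).2.1 + (pvBres cs).1))) = _
      rw [show pvBres cs = pvEncB cs i p from henc]
      show String.ofList (PySem.List.slice cs (some ((i : Nat) : Int))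
        (some (((i : Nat) : Int) + ((pvVal cs i p : Nat) : Int)))) = _
      rw [show ((i : Nat) : Int) + ((pvVal cs i p : Nat) : Int) = ((i + pvVal cs i p : Nat) : Int) by push_cast; ring]
      rw [PySem.List.slice_natCast, show i + pvVal cs i p - i = pvVal cs i p by omega]

theorem pvA_out (s : String) :
    (repeat_inside s = "" ∧ ∀ i p, ¬ pvCand s.toList i p)
    ∨ (∃ i p, pvBest s.toList i p ∧
        repeat_inside s = String.ofList ((s.toList.drop i).take (pvVal s.toList i p))) := by
  have hgood := pvFoldA_inv s.toList (pvPairsA s.toList.length) (fun _ _ => False)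
    ((0 : Int), ([] : List Char))
    (fun q hq => ((pvPairsA_mem _ q).1 hq).1)
    (pvPairsA_pairwise _)
    (fun i p h => absurd h (by simp))
    (Or.inl ⟨rfl, by simp⟩)
  have hgood' := (pvGood_iff s.toList _ (pvEncA s.toList)
    (S' := fun i p => (i, i + p) ∈ pvPairsA s.toList.length) (fun i p => by simp) _).1 hgood
  have hcov : ∀ i p, pvCand s.toList i p → (i, i + p) ∈ pvPairsA s.toList.length := by
    intro i p hc
    exact (pvPairsA_mem _ _).2 ⟨by have := hc.1; omega, (pvCand_bounds _ _ _ hc).1⟩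
  rcases hgood' with ⟨hst, hnone⟩ | ⟨i, p, hS, hcand, henc, hbest⟩
  · left
    refine ⟨?_, fun i p hc => hnone i p (hcov i p hc) hc⟩
    rw [pvA_unfold s, show pvAres s.toList = ((0 : Int), ([] : List Char)) from hst]
    rfl
  · right
    refine ⟨i, p, ⟨hcand, fun i' p' hc' hne => hbest i' p' (hcov i' p' hc') hc' hne⟩, ?_⟩
    rw [pvA_unfold s, show pvAres s.toList = pvEncA s.toList i p from henc]
    rw [if_neg]
    · rfl
    · have := pvVal_pos s.toList i p hcand.1
      simp only [pvEncA, beq_iff_eq]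
      intro h
      rw [Int.natCast_eq_zero] at h
      omega

theorem pvAB (s : String) : repeat_inside s = repeat_inside_alt s := by
  rcases pvA_out s with ⟨ea, hnca⟩ | ⟨i, p, hba, ea⟩ <;>
    rcases pvB_out s with ⟨eb, hncb⟩ | ⟨i', p', hbb, eb⟩
  · rw [ea, eb]
  · exact absurd hbb.1 (hnca i' p')
  · exact absurd hba.1 (hncb i p)
  · have hpair : (i, p) = (i', p') := by
      by_contra hne
      have h1 := hba.2 i' p' hbb.1 (fun he => hne he.symm)
      have h2 := hbb.2 i p hba.1 (fun he => hne he)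
      exact (pvBetter_asymm h1) h2
    rw [Prod.mk.injEq] at hpair
    obtain ⟨rfl, rfl⟩ := hpair
    rw [ea, eb]

-- ===== VERDICT (by name: the statement is the Claim_ definition above) =====
theorem repeat_inside_spec : Claim_equal_repeat_inside := by
  intro s _
  show repeat_inside s = repeat_inside_alt s
  exact pvAB s
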